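/- GENERATED by mk_final_copies.py from the proof of the farm's unit `start_decoder.R8` (farm:start_decoder.R8.1: Lemmas.lean) as the
   re-elaboration sweep compiled it — do not edit. -/
import Asan.CheckWalk
import Vorbis.Spec.StartDecoderBTest
import Vorbis.Spec.Units.start_decoder_R8

open X86 X86.User Asan Vorbis Vorbis.Spec Vorbis.Spec.StartDecoder

set_option maxRecDepth 4000
set_option maxHeartbeats 4000000

namespace Vorbis.Spec.start_decoder_R8

/-- **Where a store of this segment may go**: into start_decoder's stack below the steady stack pointer `R` (the 408 bytes
`[RA − 1888, R)`: the return addresses of the calls, the callees' frames), or into one of the fields of `*f` that neither the groups of SD.k (`Mid.hi k`)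
nor the zero rest (`restFrom z`) nor the arena layer reads: `[48, 112)` (the stream fields), `[136, 152)` (eof, error),
`[hi k, restFrom z)` (the fields of the running section), `[1480, 1749)`, `[1750, 1784)` (paging, the bit reader). -/
def OKSpan (g : Ghost) (k z : Nat) (w : Span) : Prop :=
  (g.R - 408 ≤ w.lo ∧ w.hi ≤ g.R) ∨
  (g.f + 48 ≤ w.lo ∧ w.hi ≤ g.f + 112) ∨
  (g.f + 136 ≤ w.lo ∧ w.hi ≤ g.f + 152) ∨
  (g.f + Mid.hi k ≤ w.lo ∧ w.hi ≤ g.f + restFrom z) ∨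
  (g.f + 1480 ≤ w.lo ∧ w.hi ≤ g.f + 1749) ∨
  (g.f + 1750 ≤ w.lo ∧ w.hi ≤ g.f + 1784)

/-- The first unassigned field lies between `codebook_count` and the paging fields. -/
theorem restFrom_bounds (z : Nat) : 160 ≤ restFrom z ∧ restFrom z ≤ 1480 := by
  unfold restFrom
  simp only [voff]
  repeat' split
  all_goals omega

/-- **Where `*f` is** (stated for the numbers; `f_where` proves it from `Frame` and `Hand`). -/
def FWhere (g : Ghost) : Prop :=
  0x119d40 ≤ g.f ∧ g.f + 1808 ≤ 0xC00000 ∧ (g.RA + 8 ≤ g.f ∨ g.f + 1808 ≤ 0x700000 ∨ 0x800000 ≤ g.f)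

/-- **Where the frame is**: the steady stack pointer, with room for the callees below it. -/
def RWhere (g : Ghost) : Prop :=
  0x700000 + 408 ≤ g.R ∧ g.R + 1480 = g.RA ∧ g.RA + 8 ≤ 0x800000 ∧ g.R % 8 = 0

/-- **Where `*f` is**, as one arithmetic fact: above the text, inside the data space, and ABOVE the return-address slot of
start_decoder (it is an object of a caller's frame) or off the stack region altogether. -/
theorem f_where {u₀ : State} {g : Ghost} {pc : Word} {A : Arena × List Obj} {v : State}
    (hfr : Frame u₀ g pc A v) (hh : g.Hand A) : FWhere g := by
  have hobj : LiveIn A.2 g.frames' g.f Off.sizeof.stb_vorbis := hh.obj.mono (frames'_sub g A.2)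
  have hw := hobj.where_ hfr.shadow hfr.offText (by decide)
  simp only [Off.sizeof.stb_vorbis] at hw
  refine ⟨hw.1, hw.2.1, ?_⟩
  obtain ⟨o, ho, k1, k2⟩ := hh.obj
  simp only [Off.sizeof.stb_vorbis] at k2
  rcases List.mem_append.mp ho with hs | hoth
  · unfold stackObjs at hs
    obtain ⟨bF, hbF, hin⟩ := List.mem_flatMap.mp hs
    have hbF' : bF ∈ g.frames' := List.mem_cons_of_mem _ hbF
    obtain ⟨a1, a8, _, _, _⟩ := hfr.shadow.stack.active bF hbF'
    have hg := FrameLayout.objsAt_gran a1 a8 hin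
    have hc := hfr.callers bF hbF
    have e : o.gLo = o.base / 8 := rfl
    left
    omega
  · have := hfr.shadow.off o hoth
    unfold OffStack at this
    omega

/-- **Where the frame is**, from `Frame`. -/
theorem r_where {u₀ : State} {g : Ghost} {pc : Word} {A : Arena × List Obj} {v : State}
    (hfr : Frame u₀ g pc A v) : RWhere g := by
  obtain ⟨h1, h2⟩ := hfr.r_eq
  obtain ⟨_, h3, h4⟩ := hfr.ra
  simp only [steady, depth] at h1 h3
  unfold RWhere
  omega

/-- **`Mid` over the stores of this segment** (`Mid.frame` with every premise but `Bits` discharged from `OKSpan`). -/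
theorem mid_carry {g : Ghost} {k kc z : Nat} {Ac : Arena} {A : Arena × List Obj} {mem mem' : Mem}
    (h : Mid g k kc z Ac A mem) (hh : g.Hand A) (hf : FWhere g) (hR : RWhere g)
    {ws : List Span} (hs : Mem.SameExcept ws mem mem') (hws : ∀ w, w ∈ ws → OKSpan g k z w)
    (hbits : Bits (g.Blk A) g.len mem' g.f) : Mid g k kc z Ac A mem' := by
  obtain ⟨hf1, hf2, hf3⟩ := hf
  obtain ⟨hR1, hR2, hR3, hR4⟩ := hR
  have hhi1 := Mid.hi_ge k
  have hhi2 := Mid.hi_le k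
  have hz := restFrom_bounds z
  have hout := hh.objOut
  simp only [Off.sizeof.stb_vorbis] at hout
  apply h.frame
  · -- the windows of `*f` that `Mid` reads
    apply ObjEq.of_sameExcept hs
    · intro w hw
      simp only [Mid.winsAt, List.mem_cons, List.mem_nil_iff, or_false] at hw
      rcases hw with rfl | rfl | rfl | rfl | rfl | rfl
      all_goals
        simp only []
        omega
    · intro w hw s hs'
      have := hws s hs'
      unfold OKSpan at this
      simp only [Mid.winsAt, List.mem_cons, List.mem_nil_iff, or_false] at hw
      rcases hw with rfl | rfl | rfl | rfl | rfl | rfl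
      all_goals
        simp only []
        omega
  · -- the blocks of the configuration arena
    intro B hB
    have hBA : A.1.Blk B := hB.mono h.extc
    have hin := arena_inside h.arena hBA
    have hst := h.arena.blk_off_stack hBA
    apply Block.Kept.of_sameExcept hs
    · intro w hw
      have := hws w hw
      unfold OKSpan at this
      have hb := h.arena.bounds
      omega
    · exact h.arena.blkOK.no_wrap hBA
  · -- the frame constants
    apply h.consts.frame
    · apply hs.eqOn
      intro w hw
      have := hws w hw
      unfold OKSpan at this
      omega
    · omega
  · intro _ _
    have e : Mem.EqOn (g.R + 0x28) (g.R + 0x2c) mem mem' := by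
      apply hs.eqOn
      intro w hw
      have := hws w hw
      unfold OKSpan at this
      omega
    exact e.i32 (g.R + 0x28) (by omega) (by omega) (by omega)
  · apply hs.eqOn
    intro w hw
    have := hws w hw
    unfold OKSpan at this
    omega
  · apply h.arena.frame
    · simp only [Off.sizeof.stb_vorbis]
      omega
    · simp only [voff]
      apply hs.eqOn
      intro w hw
      have := hws w hw
      unfold OKSpan at this
      omega
  · exact hbits

/-- **`Frame` over the stores of this segment**: the new state has the same stack pointer, the code span, DF / MXCSR; its
memory differs from the old one inside `OKSpan`s only (all of them off the shadow, off the slots `[R, RA + 8)`, off `log2_4`,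
inside the function's footprint). -/
theorem frame_carry {u₀ : State} {g : Ghost} {pc pc' : Word} {A : Arena × List Obj} {v s : State} {k z : Nat}
    (hfr : Frame u₀ g pc A v) (hok : BlkOK (g.Blk A)) (hf : FWhere g) (hR : RWhere g)
    (hrip : s.rip = pc') (hrsp : s.reg .rsp = v.reg .rsp) (hcode : CodeOK u₀ s.mem) (hinv : abiInv s)
    {ws : List Span} (hs : Mem.SameExcept ws v.mem s.mem) (hws : ∀ w, w ∈ ws → OKSpan g k z w) :
    Frame u₀ g pc' A s := by
  obtain ⟨hf1, hf2, hf3⟩ := hf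
  obtain ⟨hR1, hR2, hR3, hR4⟩ := hR
  have hhi1 := Mid.hi_ge k
  have hhi2 := Mid.hi_le k
  have hz := restFrom_bounds z
  -- the slots of the frame at and above `R` read the same
  have eslots : Mem.EqOn g.R (g.RA + 8) v.mem s.mem := by
    apply hs.eqOn
    intro w hw
    have := hws w hw
    unfold OKSpan at this
    omega
  -- the shadow is untouched
  have hun : ShadowUntouched v.mem s.mem := by
    unfold ShadowUntouched
    apply hs.eqOn
    intro w hw
    have := hws w hw
    unfold OKSpan at this
    omega
  -- `*f` and the global `log2_4` are different allocated blocks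
  have hob : g.Blk A (objBlock g.f) := runBlk_extra List.mem_cons_self
  have hlg : g.Blk A ⟨0x120640, 16⟩ := by
    apply runBlk_extra
    simp only [fixedBlocks, globalBlocks, List.mem_cons, Block.mk.injEq, or_true, true_or]
  have hd : (objBlock g.f).disjoint ⟨0x120640, 16⟩ := by
    apply hok.disjoint hob hlg
    intro e
    have e2 := congrArg Block.size e
    simp only [objBlock, Off.sizeof.stb_vorbis] at e2
    omega
  simp only [vblock, Off.sizeof.stb_vorbis] at hd
  have elog : Mem.EqOn 0x120640 0x120650 v.mem s.mem := by
    apply hs.eqOn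
    intro w hw
    have := hws w hw
    unfold OKSpan at this
    omega
  refine ⟨hfr.entry, hrip, ?_, ?_, ?_, ?_, ?_, ?_, ?_, ?_, ?_, hcode, hinv, hfr.shadow.untouched hun, hfr.offText, hfr.ext,
    hfr.callers, ?_, ?_⟩
  · rw [hrsp]
    exact hfr.rsp
  · rw [eslots.u64 (g.R + 8) (by omega) (by omega) (by omega)]
    exact hfr.shadowIdx
  · rw [eslots.u64 (g.R + 0x598) (by omega) (by omega) (by omega)]
    exact hfr.saved_rbx
  · rw [eslots.u64 (g.R + 0x5a0) (by omega) (by omega) (by omega)]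
    exact hfr.saved_rbp
  · rw [eslots.u64 (g.R + 0x5a8) (by omega) (by omega) (by omega)]
    exact hfr.saved_r12
  · rw [eslots.u64 (g.R + 0x5b0) (by omega) (by omega) (by omega)]
    exact hfr.saved_r13
  · rw [eslots.u64 (g.R + 0x5b8) (by omega) (by omega) (by omega)]
    exact hfr.saved_r14
  · rw [eslots.u64 (g.R + 0x5c0) (by omega) (by omega) (by omega)]
    exact hfr.saved_r15
  · rw [eslots.u64 (g.R + 0x5c8) (by omega) (by omega) (by omega)]
    exact hfr.saved_ra
  · -- SH7 for `log2_4`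
    intro j hj
    have e := elog.readLE_addr (0x120640 + j) 1 (by omega) (by omega) (by omega)
    have := hfr.sh7 j hj
    exact e.trans this
  · -- the function's footprint
    apply hfr.same.trans
    apply hs.mono
    intro w hw a ha1 ha2
    have := hws w hw
    unfold OKSpan at this
    rcases this with hst | hrest
    · refine ⟨⟨g.RA - depth, g.RA⟩, List.mem_cons_self, ?_, ?_⟩
      · simp only [depth]
        omega
      · simp only []
        omega
    · refine ⟨(objBlock (g.e.reg .rdi).toNat).span, List.mem_cons_of_mem _ List.mem_cons_self, ?_, ?_⟩
      · have e : (g.e.reg .rdi).toNat = g.f := rfl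
        simp only [vblock, Off.sizeof.stb_vorbis, e]
        omega
      · have e : (g.e.reg .rdi).toNat = g.f := rfl
        simp only [vblock, Off.sizeof.stb_vorbis, e]
        omega

/-- **MAPS(i) (`MapTrans`) over stores that keep every block of the arena and the windows of `*f` the mapping group reads.** -/
theorem mapTrans_carry {A7 A7c Ai : Arena} {A : Arena} {mem mem' : Mem} {f i : Nat}
    (h : MapTrans A7 A7c Ai A mem f i) (he : ObjEq MappingOK.wins mem f mem' f) (hk : AllKept A.Blk mem mem') :
    MapTrans A7 A7c Ai A mem' f i := by
  have ecount : stb_vorbis.mapping_count mem' f = stb_vorbis.mapping_count mem f := by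
    simp only [vacc, voff]
    exact he.i32 464 (by decide)
  have etab : stb_vorbis.mapping mem' f = stb_vorbis.mapping mem f := by
    simp only [vacc, voff]
    exact he.u64 472 (by decide)
  have eat : ∀ j, stb_vorbis.mapping_at mem' f j = stb_vorbis.mapping_at mem f j := by
    intro j
    unfold stb_vorbis.mapping_at
    rw [etab]
  have htabB : A.Blk ⟨stb_vorbis.mapping mem f, Off.sizeof.Mapping * (stb_vorbis.mapping_count mem f).toNat⟩ :=
    (h.MP1_block.1.mono h.ext7c).mono h.exti
  have htab := hk _ htabB
  have h1 := h.MP1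
  have hle := h.n_le
  refine ⟨h.ext7, h.ext7c, h.exti, ?_, ?_, ?_, ?_⟩
  · rw [ecount]
    exact h.n_le
  · rw [ecount]
    exact h.MP1
  · rw [ecount, etab]
    exact h.MP1_block
  · intro j hj
    rw [eat j]
    have hm : (Block.mk (stb_vorbis.mapping_at mem f j) Off.sizeof.Mapping).Kept mem mem' := by
      apply htab.mono
      · simp only [vacc, voff]
        omega
      · simp only [vacc, voff] at h1 hle ⊢
        omega
    have hrec := h.record j hj
    exact hrec.frame (he.sub (by decide)) hm (hk _ (hrec.MP2.1.mono h.exti)) hrec.MP2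

/-- **`Bits` over stores off the bytes it reads**: every window lies off `*f`, or between `stream_end` and `segment_count`
(`[f + 72, f + 1488)`: the setup fields). -/
theorem bits_carry {Blk : Block → Prop} {len : Nat} {mem mem' : Mem} {f : Nat} (h : Bits Blk len mem f)
    {ws : List Span} (hs : Mem.SameExcept ws mem mem')
    (hws : ∀ w, w ∈ ws → w.hi ≤ f ∨ f + 1808 ≤ w.lo ∨ (f + 72 ≤ w.lo ∧ w.hi ≤ f + 1488)) : Bits Blk len mem' f := by
  apply h.frame_fields
  apply Bits.SameFields.of_sameExcept hs
  · intro w hw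
    have := hws w hw
    omega
  · intro w hw
    have := hws w hw
    omega
  · intro w hw
    have := hws w hw
    omega
  · intro w hw
    have := hws w hw
    omega

/-- **The mapping loop's invariant over stores into the stack below `R`** (the return address of a check call): every field
of `MapLoop` but the program counter is carried. -/
theorem mapLoop_carry {u₀ : State} {g : Ghost} {pc pc' : Word} {i : Nat} {A7 A7c Ai : Arena} {A : Arena × List Obj}
    {v s : State} (h : MapLoop u₀ g pc i A7 A7c Ai A v) (hf : FWhere g) (hR : RWhere g)
    (hrip : s.rip = pc') (hrsp : s.reg .rsp = v.reg .rsp) (hrbp : s.reg .rbp = v.reg .rbp)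
    (hcode : CodeOK u₀ s.mem) (hinv : abiInv s)
    {ws : List Span} (hs : Mem.SameExcept ws v.mem s.mem) (hws : ∀ w, w ∈ ws → g.R - 408 ≤ w.lo ∧ w.hi ≤ g.R) :
    MapLoop u₀ g pc' i A7 A7c Ai A s := by
  have hok : ∀ w, w ∈ ws → OKSpan g 7 8 w := fun w hw => Or.inl (hws w hw)
  obtain ⟨hf1, hf2, hf3⟩ := hf
  obtain ⟨hR1, hR2, hR3, hR4⟩ := hR
  have hbits : Bits (g.Blk A) g.len s.mem g.f := by
    apply bits_carry h.mid.bits hs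
    intro w hw
    have := hws w hw
    omega
  have hmid := mid_carry h.mid h.hand ⟨hf1, hf2, hf3⟩ ⟨hR1, hR2, hR3, hR4⟩ hs hok hbits
  have hfr := frame_carry h.frame h.mid.env.ok ⟨hf1, hf2, hf3⟩ ⟨hR1, hR2, hR3, hR4⟩ hrip hrsp hcode hinv hs hok
  have eslot : Mem.EqOn g.R (g.RA + 8) v.mem s.mem := by
    apply hs.eqOn
    intro w hw
    have := hws w hw
    omega
  have eobj : ObjEq MappingOK.wins v.mem g.f s.mem g.f := by
    apply ObjEq.of_sameExcept hs
    · intro w hw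
      simp only [MappingOK.wins, List.mem_cons, List.mem_nil_iff, or_false] at hw
      rcases hw with rfl | rfl | rfl | rfl
      all_goals
        simp only []
        omega
    · intro w hw x hx
      have := hws x hx
      simp only [MappingOK.wins, List.mem_cons, List.mem_nil_iff, or_false] at hw
      rcases hw with rfl | rfl | rfl | rfl
      all_goals
        simp only []
        omega
  have ecount : stb_vorbis.mapping_count s.mem g.f = stb_vorbis.mapping_count v.mem g.f := by
    simp only [vacc, voff]
    exact eobj.i32 464 (by decide)
  have hkept : AllKept A.1.Blk v.mem s.mem := by
    apply h.mid.arena.allKept_of_stack hs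
    intro w hw
    have := hws w hw
    omega
  refine ⟨hfr, h.hand, hmid, ?_, ?_, ?_, mapTrans_carry h.maps eobj hkept⟩
  · rw [hrbp]
    exact h.rbp
  · have := h.cnt
    simp only [StartDecoder.slot] at this ⊢
    rw [eslot.u32 (g.R + 0x10) (by omega) (by omega) (by omega)]
    exact this
  · rw [ecount]
    exact h.i_le

/-- **SD.8 from the exit of the mapping loop**: with the counter at `mapping_count`, MAPS(i) is `MappingOK`; the record is
committed to the current arena (`Own.mono`), the zero rest shrinks to `total_samples …` (the next store is `mode_count`). -/
theorem mid_commit {g : Ghost} {A7 A7c : Arena} {A : Arena × List Obj} {mem : Mem} {i : Nat}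
    (h : Mid g 7 8 8 A7 A mem) (hm : MapTrans A7 A7c A.1 A.1 mem g.f i)
    (hi : (i : Int) = stb_vorbis.mapping_count mem g.f) : Mid g 8 8 9 A.1 A mem := by
  have hown7 : Own 7 A.1.Blk mem g.f := h.own.mono (fun B hB => hB.mono h.extc)
  have hmap : MappingOK A.1.Blk mem g.f := hm.upTo.toOK hi
  have hrest : RestZero mem g.f (restFrom 9) := by
    have h8 := h.rest
    unfold RestZero at h8 ⊢
    have e8 : restFrom 8 = 480 := rfl
    have e9 : restFrom 9 = 868 := rfl
    rw [e8] at h8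
    rw [e9]
    exact h8.mono (by omega) (Nat.le_refl _)
  exact ⟨h.env, h.consts, h.arena, h.noTemps, Arena.Extends.refl _, h.bits, h.first, h.discard0, h.header,
    ⟨fun _ => hown7.comment (by omega), fun _ => hown7.cb0 (by omega), fun _ => hown7.nonnull (by omega),
      fun _ => hown7.books (by omega), fun _ => hown7.floor (by omega), fun _ => hown7.residue (by omega), fun _ => hmap⟩,
    fun _ _ => h.lfl (by omega) (by omega), fun h9 => absurd h9 (by omega), hrest⟩

end Vorbis.Spec.start_decoder_R8
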